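-- pv_equiv track=rewrite | github.com/assem-khaled/Codility_solutions | Lesson 4 Counting Elements/FrogRiverOne.py | solution
-- ===== SOURCE A (Python) =====
-- def solution(X, A):
--     list = set()
--     for i in range(1 , X+1):
--         list.add(i)
--
--     for i in A:
--         try:
--             list.remove(i)
--         except:
--             pass
--         if  len(list) ==0:
--             return A.index(i)
--     return -1
-- ===== SOURCE B (Python) =====
-- def solution(X, A):
--     if not A:
--         return -1
--     # stage 1: record the first-occurrence index of every value in A
--     first = {}
--     for i, v in enumerate(A):
--         if v not in first:
--             first[v] = i
--     # stage 2: the river is covered at the latest first arrival among 1..X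
--     t = 0
--     for v in range(1, X + 1):
--         if v not in first:
--             return -1
--         t = max(t, first[v])
--     return t
-- ===== Notes on version B (the rewrite author's own statement) =====
-- stated objective: faster
-- what changed: Replaces A's online simulation (an O(X) pre-built shrinking remaining-set with a try/except remove per element and an A.index scan at the return point) by two staged passes: build a first-occurrence-index dict over A once, then scan 1..X taking the maximum first-arrival time (-1 if some leaf never arrives).
import Mathlib
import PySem

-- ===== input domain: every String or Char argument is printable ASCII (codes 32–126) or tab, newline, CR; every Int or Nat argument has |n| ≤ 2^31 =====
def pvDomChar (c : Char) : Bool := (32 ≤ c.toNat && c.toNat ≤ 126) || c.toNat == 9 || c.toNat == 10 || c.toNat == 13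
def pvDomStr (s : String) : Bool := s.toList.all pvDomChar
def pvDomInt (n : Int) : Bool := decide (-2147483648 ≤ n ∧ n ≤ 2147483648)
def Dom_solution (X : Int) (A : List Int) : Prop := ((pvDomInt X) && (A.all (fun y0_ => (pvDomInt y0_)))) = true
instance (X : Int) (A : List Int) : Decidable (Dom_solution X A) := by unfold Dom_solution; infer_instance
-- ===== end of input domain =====

-- B replaces A's online shrinking-set simulation by two staged passes: a first-occurrence
-- dict built once over A, then a scan over 1..X taking the maximum first-arrival index.

-- ===== PORT A =====
-- 'for i in A: try: list.remove(i) except: pass; if len(list)==0: return A.index(i)'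
-- A.index(i) cannot raise at the return point (i is the current element of A), so '.getD 0' is exact there.
def solA_loop (A0 : List Int) (s : PySem.Set Int) : List Int → Int
  | [] => -1
  | i :: t =>
    let s' := PySem.Set.discard s i          -- try: list.remove(i)  except: pass
    if s'.length = 0 then (((PySem.List.index? A0 i).getD 0 : Nat) : Int)
    else solA_loop A0 s' t

def solution (X : Int) (A : List Int) : Int :=
  let s := (PySem.List.pyRange 1 (X + 1)).foldl PySem.Set.add PySem.Set.empty
  solA_loop A s A

-- ===== PORT B =====
-- stage 1: 'for i, v in enumerate(A): if v not in first: first[v] = i'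
def bFirst (A : List Int) : PySem.Dict Int Int :=
  (PySem.List.enumerate A).foldl
    (fun d p => if d.contains p.2 then d else d.insert p.2 p.1) PySem.Dict.empty

-- stage 2: 'for v in range(1, X+1): if v not in first: return -1; t = max(t, first[v])'
def solB_go (first : PySem.Dict Int Int) (t : Int) : List Int → Int
  | [] => t
  | v :: r =>
    if first.contains v then solB_go first (max t (first.getD v 0)) r
    else -1

def solution_alt (X : Int) (A : List Int) : Int :=
  if A = [] then -1
  else solB_go (bFirst A) 0 (PySem.List.pyRange 1 (X + 1))

-- ===== PRECONDITION & SPEC =====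
def Spec_solution (X : Int) (A : List Int) (out : Int) : Prop := out = solution_alt X A
instance (X : Int) (A : List Int) (out : Int) : Decidable (Spec_solution X A out) := by unfold Spec_solution; infer_instance

-- ===== CLAIM (what is proved, stated in full; the proofs are below) =====
def Claim_equal_solution : Prop := ∀ (X : Int) (A : List Int), Dom_solution X A → Spec_solution X A (solution X A)

-- ===== LEMMAS AND PROOFS =====

-- the first-arrival index of v in A0, as B reads it off its dict
def pvG (A0 : List Int) (v : Int) : Int := (((PySem.List.index? A0 v).getD 0 : Nat) : Int)

lemma pv_idxOf?_append_cons (v : Int) (pref t : List Int) (h : v ∉ pref) :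
    PySem.List.index? (pref ++ v :: t) v = some pref.length := by
  induction pref with
  | nil => simp [PySem.List.index?, List.idxOf?, List.findIdx?_cons]
  | cons x p ih =>
    have hx : ¬ (x == v) = true := by simp; rintro rfl; exact h (by simp)
    have hp : v ∉ p := fun hv => h (by simp [hv])
    simp [PySem.List.index?, List.idxOf?, List.findIdx?_cons, hx] at ih ⊢
    simp [ih hp]

-- the dict stage builds exactly the first-occurrence map of A
lemma pv_bFirst_go (v : Int) :
    ∀ (L : List Int) (s : Int) (d : PySem.Dict Int Int),
      ((PySem.List.enumerate L s).foldl
        (fun d p => if d.contains p.2 then d else d.insert p.2 p.1) d).get? v =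
      match d.get? v with
      | some x => some x
      | none => (PySem.List.index? L v).map (fun n => s + (n : Int)) := by
  intro L
  induction L with
  | nil => intro s d; cases h : d.get? v <;> simp [PySem.List.enumerate_nil, PySem.List.index?, h]
  | cons a t ih =>
    intro s d
    rw [PySem.List.enumerate_cons]
    simp only [List.foldl_cons]
    by_cases hc : d.contains a
    · rw [if_pos hc, ih]
      by_cases hv : v = a
      · subst hv
        rw [PySem.Dict.contains_eq_isSome_get?] at hc
        cases h : d.get? v
        · rw [h] at hc; simp at hc
        · simp
      · cases h : d.get? v
        · rw [PySem.List.index?_cons_of_ne _ (Ne.symm hv)]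
          cases PySem.List.index? t v <;> simp
          omega
        · simp
    · rw [if_neg hc, ih]
      have hd0 : d.get? a = none := by
        rw [PySem.Dict.contains_eq_isSome_get?] at hc
        cases h : d.get? a
        · rfl
        · rw [h] at hc; simp at hc
      by_cases hv : v = a
      · subst hv
        rw [PySem.Dict.get?_insert_self, hd0, PySem.List.index?_cons_self]
        simp
      · rw [PySem.Dict.get?_insert, if_neg hv]
        cases h : d.get? v
        · rw [PySem.List.index?_cons_of_ne _ (Ne.symm hv)]
          cases PySem.List.index? t v <;> simp
          omega
        · simp

lemma pv_bFirst_get? (A : List Int) (v : Int) :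
    (bFirst A).get? v = (PySem.List.index? A v).map (fun n => (n : Int)) := by
  rw [bFirst, pv_bFirst_go]
  simp [PySem.Dict.get?_empty]

lemma pv_bFirst_mem (A : List Int) (v : Int) (h : v ∈ A) :
    (bFirst A).contains v = true ∧ (bFirst A).getD v 0 = pvG A v := by
  obtain ⟨n, hn⟩ := Option.isSome_iff_exists.1 ((PySem.List.index?_isSome_iff A v).2 h)
  constructor
  · rw [PySem.Dict.contains_eq_isSome_get?, pv_bFirst_get?, hn]; rfl
  · rw [PySem.Dict.getD_eq_get?_getD, pv_bFirst_get?, hn, pvG, hn]; rfl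

lemma pv_bFirst_not_mem (A : List Int) (v : Int) (h : v ∉ A) :
    (bFirst A).contains v = false := by
  rw [PySem.Dict.contains_eq_isSome_get?, pv_bFirst_get?,
    (PySem.List.index?_eq_none_iff A v).2 h]; rfl

-- B's range scan: fails iff some needed value never arrives, else folds max of first arrivals
lemma pv_B_fail (A : List Int) :
    ∀ (L : List Int) (t : Int), (∃ v ∈ L, v ∉ A) → solB_go (bFirst A) t L = -1 := by
  intro L
  induction L with
  | nil => rintro t ⟨v, hv, -⟩; simp at hv
  | cons a r ih =>
    rintro t ⟨v, hv, hvA⟩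
    by_cases ha : a ∈ A
    · have hva : v ≠ a := fun he => hvA (he ▸ ha)
      rw [solB_go, if_pos (pv_bFirst_mem A a ha).1]
      exact ih _ ⟨v, by simpa [hva] using hv, hvA⟩
    · rw [solB_go, if_neg (by simp [pv_bFirst_not_mem A a ha])]

lemma pv_B_ok (A : List Int) :
    ∀ (L : List Int) (t : Int), (∀ v ∈ L, v ∈ A) →
      solB_go (bFirst A) t L = L.foldl (fun t v => max t (pvG A v)) t := by
  intro L
  induction L with
  | nil => intro t _; rfl
  | cons a r ih =>
    intro t h
    have ha := pv_bFirst_mem A a (h a (by simp))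
    rw [solB_go, if_pos ha.1, ha.2, List.foldl_cons]
    exact ih _ (fun v hv => h v (by simp [hv]))

-- fold-max facts
lemma pv_fold_ge_init (g : Int → Int) :
    ∀ (L : List Int) (t : Int), t ≤ L.foldl (fun t v => max t (g v)) t := by
  intro L
  induction L with
  | nil => intro t; simp
  | cons a r ih =>
    intro t
    calc t ≤ max t (g a) := le_max_left _ _
    _ ≤ _ := ih _

lemma pv_fold_ge_mem (g : Int → Int) :
    ∀ (L : List Int) (t : Int) (v : Int), v ∈ L → g v ≤ L.foldl (fun t v => max t (g v)) t := by
  intro L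
  induction L with
  | nil => intro t v hv; simp at hv
  | cons a r ih =>
    intro t v hv
    rw [List.foldl_cons]
    rcases List.mem_cons.1 hv with rfl | hv
    · calc g v ≤ max t (g v) := le_max_right _ _
      _ ≤ _ := pv_fold_ge_init g r _
    · exact ih _ v hv

lemma pv_fold_cases (g : Int → Int) :
    ∀ (L : List Int) (t : Int),
      L.foldl (fun t v => max t (g v)) t = t ∨ ∃ v ∈ L, L.foldl (fun t v => max t (g v)) t = g v := by
  intro L
  induction L with
  | nil => intro t; left; rfl
  | cons a r ih =>
    intro t
    rw [List.foldl_cons]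
    rcases ih (max t (g a)) with h | ⟨v, hv, h⟩
    · rcases max_choice t (g a) with hm | hm
      · left; rw [h, hm]
      · right; exact ⟨a, by simp, by rw [h, hm]⟩
    · right; exact ⟨v, by simp [hv], h⟩

-- A's set after processing a prefix 'P' of the input is {1..X} minus the values of P.
lemma pv_discard_filter (R P : List Int) (v : Int) :
    PySem.Set.discard (R.filter (fun y => !P.contains y)) v
      = R.filter (fun y => !(P ++ [v]).contains y) := by
  simp only [PySem.Set.discard, List.filter_filter]
  apply List.filter_congr
  intro y _
  by_cases hy : y = v <;> simp [hy]

-- if some needed value never arrives, A's loop runs out and returns -1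
lemma pv_A_neg (A0 : List Int) :
    ∀ (rest : List Int) (S : PySem.Set Int), (∃ w ∈ S, w ∉ rest) → solA_loop A0 S rest = -1 := by
  intro rest
  induction rest with
  | nil => intro S _; rfl
  | cons a t ih =>
    rintro S ⟨w, hwS, hw⟩
    have hwa : w ≠ a := fun he => hw (by simp [he])
    have hw' : w ∈ PySem.Set.discard S a := (PySem.Set.mem_discard S a w).2 ⟨hwS, hwa⟩
    rw [solA_loop]
    rw [if_neg (by simp [List.length_eq_zero_iff]; exact fun h => by simp [h] at hw')]
    exact ih _ ⟨w, hw', fun h => hw (by simp [h])⟩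

-- if every needed value arrives, A's loop returns the max first-arrival index
lemma pv_A_pos (X : Int) (A0 : List Int)
    (hsub : ∀ v ∈ PySem.List.pyRange 1 (X + 1), v ∈ A0) :
    ∀ (rest pref : List Int), A0 = pref ++ rest →
      (∃ v ∈ PySem.List.pyRange 1 (X + 1), v ∉ pref) →
      solA_loop A0 ((PySem.List.pyRange 1 (X + 1)).filter (fun y => !pref.contains y)) rest
        = (PySem.List.pyRange 1 (X + 1)).foldl (fun t v => max t (pvG A0 v)) 0 := by
  intro rest
  induction rest with
  | nil =>
    rintro pref hA ⟨v, hvR, hvp⟩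
    exact absurd (hsub v hvR) (by simpa [hA] using hvp)
  | cons a t ih =>
    rintro pref hA hex
    rw [solA_loop]
    have hdis := pv_discard_filter (PySem.List.pyRange 1 (X + 1)) pref a
    by_cases hnil :
        (PySem.List.pyRange 1 (X + 1)).filter (fun y => !(pref ++ [a]).contains y) = []
    · -- the set just emptied: A returns A0.index a = pref.length = the fold max
      obtain ⟨v0, hv0R, hv0p⟩ := hex
      have hall : ∀ v ∈ PySem.List.pyRange 1 (X + 1), v ∈ pref ++ [a] := by
        intro v hv
        have := (List.filter_eq_nil_iff.1 hnil) v hv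
        by_cases hvp2 : v ∈ pref
        · exact List.mem_append.2 (Or.inl hvp2)
        · simp at this; simp [this hvp2]
      have hv0a : v0 = a := by
        rcases List.mem_append.1 (hall v0 hv0R) with h | h
        · exact absurd h hv0p
        · simpa using h
      subst hv0a
      have hidx : PySem.List.index? A0 v0 = some pref.length := by
        rw [hA]; exact pv_idxOf?_append_cons v0 pref t hv0p
      have hga : pvG A0 v0 = (pref.length : Int) := by rw [pvG, hidx]; rfl
      have hge : (pref.length : Int) ≤
          (PySem.List.pyRange 1 (X + 1)).foldl (fun t v => max t (pvG A0 v)) 0 := by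
        rw [← hga]; exact pv_fold_ge_mem _ _ _ _ hv0R
      have hle : (PySem.List.pyRange 1 (X + 1)).foldl (fun t v => max t (pvG A0 v)) 0
          ≤ (pref.length : Int) := by
        rcases pv_fold_cases (pvG A0) (PySem.List.pyRange 1 (X + 1)) 0 with h | ⟨v, hvR, h⟩
        · rw [h]; positivity
        · rcases List.mem_append.1 (hall v hvR) with hvp | hva
          · -- v occurs in the prefix, so its first index is < pref.length
            obtain ⟨k, hk⟩ := Option.isSome_iff_exists.1
              ((PySem.List.index?_isSome_iff pref v).2 hvp)
            have hidxv : PySem.List.index? A0 v = some k := by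
              rw [hA, PySem.List.index?_append_of_mem _ hvp]
              exact hk
            obtain ⟨pre, suf, hsplit, hlen, -⟩ := (PySem.List.index?_eq_some_iff pref v k).1 hk
            have hklt : k < pref.length := by
              rw [← hlen, hsplit]; simp
            rw [h, pvG, hidxv]
            simp; omega
          · rw [h, pvG]
            simp at hva; subst hva
            rw [hidx]; simp
      rw [hdis, if_pos (by rw [List.length_eq_zero_iff]; exact hnil), hidx]
      simp; omega
    · rw [hdis, if_neg (by rw [List.length_eq_zero_iff]; exact hnil)]
      obtain ⟨v, hv⟩ := List.exists_mem_of_ne_nil _ hnil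
      have hvR := List.mem_of_mem_filter hv
      have hvp : v ∉ pref ++ [a] := by
        have := List.of_mem_filter hv; simpa using this
      exact ih (pref ++ [a]) (by simp [hA]) ⟨v, hvR, hvp⟩

-- ===== VERDICT (by name: the statement is the Claim_ definition above) =====
theorem solution_spec : Claim_equal_solution := by
  intro X A _
  unfold Spec_solution solution solution_alt
  have hinit : (PySem.List.pyRange 1 (X + 1)).foldl PySem.Set.add PySem.Set.empty
      = (PySem.List.pyRange 1 (X + 1)).filter (fun y => !([] : List Int).contains y) := by
    have : (PySem.List.pyRange 1 (X + 1)).foldl PySem.Set.add PySem.Set.empty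
        = PySem.Set.ofList (PySem.List.pyRange 1 (X + 1)) := rfl
    rw [this, PySem.Set.ofList_eq_self_of_nodup _ (PySem.List.nodup_pyRange_one 1 (X + 1))]
    simp
  cases A with
  | nil => simp [solA_loop]
  | cons a t =>
    rw [if_neg (by simp)]
    by_cases hsub : ∀ v ∈ PySem.List.pyRange 1 (X + 1), v ∈ (a :: t)
    · by_cases hX : X ≤ 0
      · -- nothing to cover: both return 0 at the first element
        have hR : PySem.List.pyRange 1 (X + 1) = [] :=
          PySem.List.pyRange_one_eq_nil (by omega)
        rw [hR] at hinit ⊢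
        simp only [hinit]
        rw [solA_loop]
        rw [PySem.List.index?_cons_self]
        simp [PySem.Set.discard, solB_go]
      · have h1 : (1 : Int) ∈ PySem.List.pyRange 1 (X + 1) :=
          PySem.List.mem_pyRange_one.2 ⟨le_refl 1, by omega⟩
        rw [hinit, pv_A_pos X (a :: t) hsub (a :: t) [] rfl ⟨1, h1, by simp⟩,
            pv_B_ok _ _ _ hsub]
    · obtain ⟨v, hvR, hvA⟩ : ∃ v ∈ PySem.List.pyRange 1 (X + 1), v ∉ (a :: t) := by
        simp only [not_forall] at hsub
        obtain ⟨v, hv⟩ := hsub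
        exact ⟨v, by tauto⟩
      rw [hinit, pv_A_neg _ _ _ ⟨v, by simpa using hvR, hvA⟩, pv_B_fail _ _ _ ⟨v, hvR, hvA⟩]
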